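-- pv_equiv track=rewrite | github.com/raymondcheung8/rlcard | rlcard/agents/equity_agent.py | get_royal_flush_outs
-- ===== SOURCE A (Python) =====
-- def get_royal_flush_outs(cards):
--     '''
--     Args:
--         cards (list): A list of strings that represent cards
--
--     Returns:
--         outs (int): The number of outs for getting a royal flush
--     '''
--     all_suits = ['D', 'C', 'H', 'S']
--     all_ranks = ['10', 'J', 'Q', 'K', 'A']
--     possible_royal_flushes = []
--     for suit in all_suits:
--         royal_flush = list(map(lambda rank: suit + rank, all_ranks))
--         for card in cards:
--             if card in royal_flush:
--                 royal_flush.remove(card)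
--
--         if len(royal_flush) == 0:
--             # Return -1 if a straight already exists
--             return -1
--         elif len(royal_flush) == 1:
--             possible_royal_flushes.append(royal_flush)
--
--     all_ranks.pop(0)
--
--     # All cards have to be the same suit in a royal flush
--     return len(possible_royal_flushes)
-- ===== SOURCE B (Python) =====
-- def get_royal_flush_outs(cards):
--     ranks = ('10', 'J', 'Q', 'K', 'A')
--     suits = ('D', 'C', 'H', 'S')
--     by_suit = {}
--     for card in cards:
--         suit, rank = card[:1], card[1:]
--         if suit in suits and rank in ranks:
--             by_suit.setdefault(suit, set()).add(rank)
--     outs = 0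
--     for suit in suits:
--         present = len(by_suit.get(suit, set()))
--         if present == 5:
--             return -1
--         if present == 4:
--             outs += 1
--     return outs
-- ===== Notes on version B (the rewrite author's own statement) =====
-- stated objective: alternative
-- what changed: Instead of rescanning the whole card list once per suit and destructively removing matches from a 5-card template list, B makes one indexing pass over cards building a dict suit -> set of present royal ranks, then checks the four set sizes in one pass (5 present -> -1, count suits with 4 present).
import Mathlib
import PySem

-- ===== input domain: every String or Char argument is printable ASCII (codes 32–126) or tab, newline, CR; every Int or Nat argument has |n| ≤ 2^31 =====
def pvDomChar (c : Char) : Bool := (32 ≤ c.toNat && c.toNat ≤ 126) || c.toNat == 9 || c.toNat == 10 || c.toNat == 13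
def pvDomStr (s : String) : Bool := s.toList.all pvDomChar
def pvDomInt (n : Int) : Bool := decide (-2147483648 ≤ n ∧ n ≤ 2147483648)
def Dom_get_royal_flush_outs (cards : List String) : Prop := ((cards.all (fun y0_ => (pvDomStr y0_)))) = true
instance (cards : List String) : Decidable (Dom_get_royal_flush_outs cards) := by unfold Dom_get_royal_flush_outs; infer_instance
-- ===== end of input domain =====

-- B replaces A's per-suit rescans of the card list (with list.remove) by a single indexing
-- pass building a dict suit → set of present royal ranks, then one pass over the four suits
-- (objective: alternative decomposition, same exact result).

-- ===== PORT A =====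
-- inner loop: 'for card in cards: if card in royal_flush: royal_flush.remove(card)'
def grfA_removeLoop (cards : List String) (rf : List String) : List String :=
  cards.foldl (fun acc card =>
    if acc.contains card then (PySem.List.remove? acc card).getD acc else acc) rf

-- outer loop 'for suit in all_suits' with the early 'return -1'; poss = possible_royal_flushes
-- (the 'all_ranks.pop(0)' before the final return mutates a dead local and affects nothing)
def grfA_suitLoop (cards : List String) : List String → List (List String) → Int
  | [], poss => (poss.length : Int)
  | suit :: rest, poss =>
    let royal_flush := (["10", "J", "Q", "K", "A"] : List String).map (fun rank => suit ++ rank)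
    let royal_flush := grfA_removeLoop cards royal_flush
    if royal_flush.length = 0 then -1
    else if royal_flush.length = 1 then grfA_suitLoop cards rest (poss ++ [royal_flush])
    else grfA_suitLoop cards rest poss

def get_royal_flush_outs (cards : List String) : Int :=
  grfA_suitLoop cards ["D", "C", "H", "S"] []

-- ===== PORT B =====
def grfB_ranks : List String := ["10", "J", "Q", "K", "A"]
def grfB_suits : List String := ["D", "C", "H", "S"]

-- loop body: suit, rank = card[:1], card[1:]; if suit in suits and rank in ranks:
--   by_suit.setdefault(suit, set()).add(rank)   (= Dict.modify: d[suit] = d.get(suit, set()) ∪ {rank})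
def grfB_step (d : PySem.Dict String (PySem.Set String)) (card : String) :
    PySem.Dict String (PySem.Set String) :=
  let suit := String.ofList (card.toList.take 1)
  let rank := String.ofList (card.toList.drop 1)
  if grfB_suits.contains suit && grfB_ranks.contains rank then
    PySem.Dict.modify d suit PySem.Set.empty (fun s => PySem.Set.add s rank)
  else d

def grfB_index (cards : List String) : PySem.Dict String (PySem.Set String) :=
  cards.foldl grfB_step PySem.Dict.empty

-- 'for suit in suits: present = len(by_suit.get(suit, set())); if present == 5: return -1;
--  if present == 4: outs += 1'
def grfB_count (d : PySem.Dict String (PySem.Set String)) : List String → Int → Int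
  | [], outs => outs
  | suit :: rest, outs =>
    let present := PySem.Set.len (PySem.Dict.getD d suit PySem.Set.empty)
    if present = 5 then -1
    else if present = 4 then grfB_count d rest (outs + 1)
    else grfB_count d rest outs

def get_royal_flush_outs_alt (cards : List String) : Int :=
  grfB_count (grfB_index cards) grfB_suits 0

-- ===== PRECONDITION & SPEC =====
def Spec_get_royal_flush_outs (cards : List String) (out : Int) : Prop := out = get_royal_flush_outs_alt cards
instance (cards : List String) (out : Int) : Decidable (Spec_get_royal_flush_outs cards out) := by unfold Spec_get_royal_flush_outs; infer_instance

-- ===== CLAIM (what is proved, stated in full; the proofs are below) =====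
def Claim_equal_get_royal_flush_outs : Prop := ∀ (cards : List String), Dom_get_royal_flush_outs cards → Spec_get_royal_flush_outs cards (get_royal_flush_outs cards)

-- ===== LEMMAS AND PROOFS =====

-- number of royal ranks of suit s present among cards (the common quantity both programs measure)
def grf_pc (cards : List String) (s : String) : Nat :=
  ((["10", "J", "Q", "K", "A"] : List String).filter (fun r => cards.contains (s ++ r))).length

theorem grf_pc_le (cards : List String) (s : String) : grf_pc cards s ≤ 5 := by
  have := List.length_filter_le (fun r => cards.contains (s ++ r))
      (["10", "J", "Q", "K", "A"] : List String)
  simpa [grf_pc] using this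

-- A's remove loop on a duplicate-free list keeps exactly the elements not occurring in cards
theorem grfA_removeLoop_eq (cards : List String) :
    ∀ rf : List String, rf.Nodup →
      grfA_removeLoop cards rf = rf.filter (fun x => !cards.contains x) := by
  induction cards with
  | nil => intro rf h; simp [grfA_removeLoop]
  | cons c cs ih =>
    intro rf h
    have hstep : (if rf.contains c then (PySem.List.remove? rf c).getD rf else rf)
        = rf.filter (fun x => x != c) := by
      by_cases hc : c ∈ rf
      · rw [if_pos (by simpa using hc), PySem.List.remove?_eq_some_erase rf c hc]
        simp [h.erase_eq_filter]
      · rw [if_neg (by simpa using hc)]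
        symm
        apply List.filter_eq_self.mpr
        intro x hx
        simp only [bne_iff_ne, ne_eq]
        rintro rfl; exact hc hx
    have hnd : (rf.filter (fun x => x != c)).Nodup := h.filter _
    calc grfA_removeLoop (c :: cs) rf
        = grfA_removeLoop cs (rf.filter (fun x => x != c)) := by
          simp only [grfA_removeLoop, List.foldl_cons, hstep]
      _ = (rf.filter (fun x => x != c)).filter (fun x => !cs.contains x) := ih _ hnd
      _ = rf.filter (fun x => !(c :: cs).contains x) := by
          rw [List.filter_filter]
          apply List.filter_congr
          intro x hx
          by_cases hxc : x = c <;> simp [hxc]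

theorem grf_len_split {α : Type} (p : α → Bool) : ∀ l : List α,
    (l.filter (fun x => !p x)).length + (l.filter p).length = l.length := by
  intro l
  induction l with
  | nil => simp
  | cons a l ih => by_cases h : p a <;> simp [h] <;> omega

-- A's per-suit leftover count is 5 minus the number of present royal ranks
theorem grfA_length_add_pc (cards : List String) (s : String) :
    (grfA_removeLoop cards
        ((["10", "J", "Q", "K", "A"] : List String).map (fun rank => s ++ rank))).length
      + grf_pc cards s = 5 := by
  have hinj : Function.Injective (fun r : String => s ++ r) := by
    intro a b h
    simp only at h
    have h2 := congrArg String.toList h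
    simp only [String.toList_append] at h2
    exact String.toList_inj.mp (List.append_cancel_left h2)
  have hnd : ((["10", "J", "Q", "K", "A"] : List String).map (fun rank => s ++ rank)).Nodup :=
    (by decide : (["10", "J", "Q", "K", "A"] : List String).Nodup).map hinj
  rw [grfA_removeLoop_eq _ _ hnd, List.filter_map, List.length_map]
  have := grf_len_split (fun r : String => cards.contains (s ++ r)) ["10", "J", "Q", "K", "A"]
  simpa [grf_pc, Function.comp] using this

-- splitting a card at position 1 against a one-character suit
theorem grf_split (s card r : String) (hs : s.toList.length = 1) :
    card = s ++ r ↔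
      (String.ofList (card.toList.take 1) = s ∧ String.ofList (card.toList.drop 1) = r) := by
  constructor
  · rintro rfl
    rw [String.toList_append, ← hs]
    rw [List.take_left, List.drop_left]
    exact ⟨String.ofList_toList, String.ofList_toList⟩
  · rintro ⟨h1, h2⟩
    apply String.toList_inj.mp
    rw [String.toList_append, ← h1, ← h2, String.toList_ofList, String.toList_ofList]
    exact (List.take_append_drop _ _).symm

theorem grfB_step_mem (d : PySem.Dict String (PySem.Set String)) (card s r : String)
    (hs : s ∈ grfB_suits) :
    r ∈ PySem.Dict.getD (grfB_step d card) s PySem.Set.empty ↔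
      r ∈ PySem.Dict.getD d s PySem.Set.empty ∨ (r ∈ grfB_ranks ∧ card = s ++ r) := by
  have hs1 : s.toList.length = 1 := by fin_cases hs <;> decide
  unfold grfB_step
  by_cases hcond : (grfB_suits.contains (String.ofList (card.toList.take 1))
      && grfB_ranks.contains (String.ofList (card.toList.drop 1))) = true
  · rw [if_pos hcond]
    simp only [Bool.and_eq_true, List.contains_iff_mem] at hcond
    obtain ⟨hsuit, hrank⟩ := hcond
    by_cases he : s = String.ofList (card.toList.take 1)
    · rw [PySem.Dict.getD_modify, if_pos he, ← he, PySem.Set.mem_add]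
      constructor
      · rintro (h | rfl)
        · exact Or.inl h
        · exact Or.inr ⟨hrank, (grf_split s card _ hs1).mpr ⟨he.symm, rfl⟩⟩
      · rintro (h | ⟨hr, hcard⟩)
        · exact Or.inl h
        · exact Or.inr ((grf_split s card r hs1).mp hcard).2.symm
    · rw [PySem.Dict.getD_modify, if_neg he]
      constructor
      · exact Or.inl
      · rintro (h | ⟨hr, hcard⟩)
        · exact h
        · exact absurd ((grf_split s card r hs1).mp hcard).1.symm he
  · rw [if_neg hcond]
    constructor
    · exact Or.inl
    · rintro (h | ⟨hr, hcard⟩)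
      · exact h
      · exfalso
        apply hcond
        obtain ⟨h1, h2⟩ := (grf_split s card r hs1).mp hcard
        rw [h1, h2]
        simp only [Bool.and_eq_true, List.contains_iff_mem]
        exact ⟨hs, hr⟩

-- B's index entry for a suit holds exactly the royal ranks whose card occurs in cards
theorem grfB_index_mem (cards : List String) (s : String) (hs : s ∈ grfB_suits) (r : String) :
    ∀ d : PySem.Dict String (PySem.Set String),
      (r ∈ PySem.Dict.getD (cards.foldl grfB_step d) s PySem.Set.empty ↔
        r ∈ PySem.Dict.getD d s PySem.Set.empty ∨ (r ∈ grfB_ranks ∧ (s ++ r) ∈ cards)) := by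
  induction cards with
  | nil => intro d; simp
  | cons card cs ih =>
    intro d
    rw [List.foldl_cons, ih (grfB_step d card), grfB_step_mem d card s r hs]
    simp only [List.mem_cons]
    constructor
    · rintro ((h | ⟨hr, hc⟩) | ⟨hr, hc⟩)
      · exact Or.inl h
      · exact Or.inr ⟨hr, Or.inl hc.symm⟩
      · exact Or.inr ⟨hr, Or.inr hc⟩
    · rintro (h | ⟨hr, (hc | hc)⟩)
      · exact Or.inl (Or.inl h)
      · exact Or.inl (Or.inr ⟨hr, hc.symm⟩)
      · exact Or.inr ⟨hr, hc⟩

theorem grfB_step_nodup (d : PySem.Dict String (PySem.Set String)) (card s : String)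
    (h : (PySem.Dict.getD d s PySem.Set.empty).Nodup) :
    (PySem.Dict.getD (grfB_step d card) s PySem.Set.empty).Nodup := by
  unfold grfB_step
  by_cases hcond : (grfB_suits.contains (String.ofList (card.toList.take 1))
      && grfB_ranks.contains (String.ofList (card.toList.drop 1))) = true
  · rw [if_pos hcond, PySem.Dict.getD_modify]
    split
    · exact PySem.Set.nodup_add _ _ (by assumption ▸ h)
    · exact h
  · rw [if_neg hcond]; exact h

theorem grfB_index_nodup (cards : List String) (s : String) :
    ∀ d : PySem.Dict String (PySem.Set String),
      (PySem.Dict.getD d s PySem.Set.empty).Nodup →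
      (PySem.Dict.getD (cards.foldl grfB_step d) s PySem.Set.empty).Nodup := by
  induction cards with
  | nil => intro d h; simpa using h
  | cons card cs ih =>
    intro d h
    exact ih (grfB_step d card) (grfB_step_nodup d card s h)

-- B's per-suit set size is the number of present royal ranks
theorem grfB_len (cards : List String) (s : String) (hs : s ∈ grfB_suits) :
    PySem.Set.len (PySem.Dict.getD (grfB_index cards) s PySem.Set.empty) = (grf_pc cards s : Int) := by
  unfold grfB_index
  have hnd : (PySem.Dict.getD (cards.foldl grfB_step PySem.Dict.empty) s PySem.Set.empty).Nodup :=
    grfB_index_nodup cards s PySem.Dict.empty (by simp [PySem.Dict.getD_empty, PySem.Set.empty])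
  have hndf : ((["10", "J", "Q", "K", "A"] : List String).filter
      (fun r => cards.contains (s ++ r))).Nodup :=
    (by decide : (["10", "J", "Q", "K", "A"] : List String).Nodup).filter _
  have hmem : ∀ r : String,
      r ∈ PySem.Dict.getD (cards.foldl grfB_step PySem.Dict.empty) s PySem.Set.empty ↔
      r ∈ (["10", "J", "Q", "K", "A"] : List String).filter (fun r => cards.contains (s ++ r)) := by
    intro r
    rw [grfB_index_mem cards s hs r PySem.Dict.empty, List.mem_filter]
    simp [PySem.Dict.getD_empty, PySem.Set.empty, grfB_ranks]
  have hperm := (List.perm_ext_iff_of_nodup hnd hndf).mpr hmem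
  simp only [PySem.Set.len, grf_pc, Int.natCast_inj]
  exact hperm.length_eq

-- both loops over the suits agree once each suit's two counts are tied to grf_pc
theorem grf_bridge (cards : List String) :
    ∀ (suitsL : List String) (poss : List (List String)) (outs : Int),
      (∀ s ∈ suitsL,
        (grfA_removeLoop cards
            ((["10", "J", "Q", "K", "A"] : List String).map (fun rank => s ++ rank))).length
          + grf_pc cards s = 5 ∧
        PySem.Set.len (PySem.Dict.getD (grfB_index cards) s PySem.Set.empty) = (grf_pc cards s : Int)) →
      outs = (poss.length : Int) →
      grfA_suitLoop cards suitsL poss = grfB_count (grfB_index cards) suitsL outs := by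
  intro suitsL
  induction suitsL with
  | nil => intro poss outs _ houts; simp [grfA_suitLoop, grfB_count, houts]
  | cons s rest ih =>
    intro poss outs hfacts houts
    obtain ⟨hA, hB⟩ := hfacts s (List.mem_cons_self)
    have hrest := fun t ht => hfacts t (List.mem_cons_of_mem s ht)
    have hle := grf_pc_le cards s
    simp only [grfA_suitLoop, grfB_count, hB]
    by_cases h5 : grf_pc cards s = 5
    · have e0 : (grfA_removeLoop cards
          ((["10", "J", "Q", "K", "A"] : List String).map (fun rank => s ++ rank))).length = 0 := by
        omega
      have f5 : ((grf_pc cards s : Int)) = 5 := by exact_mod_cast h5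
      rw [if_pos e0, if_pos f5]
    · have e0 : ¬(grfA_removeLoop cards
          ((["10", "J", "Q", "K", "A"] : List String).map (fun rank => s ++ rank))).length = 0 := by
        omega
      have f5 : ¬((grf_pc cards s : Int)) = 5 := by exact_mod_cast h5
      rw [if_neg e0, if_neg f5]
      by_cases h4 : grf_pc cards s = 4
      · have e1 : (grfA_removeLoop cards
            ((["10", "J", "Q", "K", "A"] : List String).map (fun rank => s ++ rank))).length = 1 := by
          omega
        have f4 : ((grf_pc cards s : Int)) = 4 := by exact_mod_cast h4
        rw [if_pos e1, if_pos f4]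
        apply ih _ _ hrest
        simp [houts]
      · have e1 : ¬(grfA_removeLoop cards
            ((["10", "J", "Q", "K", "A"] : List String).map (fun rank => s ++ rank))).length = 1 := by
          omega
        have f4 : ¬((grf_pc cards s : Int)) = 4 := by exact_mod_cast h4
        rw [if_neg e1, if_neg f4]
        exact ih _ _ hrest houts

-- ===== VERDICT (by name: the statement is the Claim_ definition above) =====
theorem get_royal_flush_outs_spec : Claim_equal_get_royal_flush_outs := by
  intro cards _
  unfold Spec_get_royal_flush_outs get_royal_flush_outs get_royal_flush_outs_alt
  exact grf_bridge cards grfB_suits [] 0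
    (fun s hs => ⟨grfA_length_add_pc cards s, grfB_len cards s hs⟩) rfl
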